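-- pv_equiv track=rewrite | github.com/mcodepreneur/tic_tac_toe_AI | tic_tac_toe.py | is_center_hole
-- ===== SOURCE A (Python) =====
-- def is_center_hole(set) :
--     i = 0
--     x = 0
--     y = 0
--     is_center = False
--     for set in set :
--         for place in set :
--             if place != '-' :
--                 if y == 1 and x == 1 :
--                     is_center = True
--                 else :
--                     return False
--             else :
--                 i += 1
--             x += 1
--         y += 1
--         x = 0
--     if is_center :
--         return True
--     return None
-- ===== SOURCE B (Python) =====
-- def is_center_hole(set):
--     total = sum(len(row) for row in set)
--     dashes = sum(row.count('-') for row in set)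
--     filled = total - dashes
--     if filled == 0:
--         return None
--     center = len(set) > 1 and len(set[1]) > 1 and set[1][1] != '-'
--     return filled == 1 and center
-- ===== Notes on version B (the rewrite author's own statement) =====
-- stated objective: alternative
-- what changed: B never scans cell-by-cell for the answer: it computes the filled-cell count arithmetically as sum(len(row)) - sum(row.count('-')) and probes set[1][1] once behind length guards, then classifies (0 filled -> None, exactly 1 filled and it is the center -> True, else False), replacing A's position-tracking nested loop with counters, a flag and an early return.
import Mathlib
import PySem

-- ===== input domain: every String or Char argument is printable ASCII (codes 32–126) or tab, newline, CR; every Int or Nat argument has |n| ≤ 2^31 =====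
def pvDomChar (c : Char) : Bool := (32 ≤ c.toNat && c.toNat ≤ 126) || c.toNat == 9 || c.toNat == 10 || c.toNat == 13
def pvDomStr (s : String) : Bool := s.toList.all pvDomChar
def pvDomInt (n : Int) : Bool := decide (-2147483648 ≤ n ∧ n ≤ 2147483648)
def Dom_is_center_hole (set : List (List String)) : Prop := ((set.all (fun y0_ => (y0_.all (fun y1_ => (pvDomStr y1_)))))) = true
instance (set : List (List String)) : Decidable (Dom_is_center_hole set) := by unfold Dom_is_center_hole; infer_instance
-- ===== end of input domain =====

-- B replaces A's position-tracking scan with aggregate counting: filled = sum(len) - sum(count '-'),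
-- one guarded probe of set[1][1], then a three-way classification (objective: alternative).

-- ===== PORT A =====
-- inner loop of A: walks one row; `none` = the Python `return False` escape,
-- `some (i, x, is_center)` = the loop finished with this state.
def pvARow (row : List String) (y : Int) (x : Int) (i : Int) (is_center : Bool) :
    Option (Int × Int × Bool) :=
  match row with
  | [] => some (i, x, is_center)
  | place :: rest =>
    if place ≠ "-" then
      if y = 1 ∧ x = 1 then pvARow rest y (x + 1) i true
      else none
    else pvARow rest y (x + 1) (i + 1) is_center

-- outer loop of A: after each row, y += 1 and x resets to 0
def pvAOuter (rows : List (List String)) (y : Int) (i : Int) (is_center : Bool) : Option Bool :=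
  match rows with
  | [] => if is_center then some true else none
  | row :: rest =>
    match pvARow row y 0 i is_center with
    | none => some false
    | some (i', _, ic') => pvAOuter rest (y + 1) i' ic'

def is_center_hole (set : List (List String)) : Option Bool :=
  pvAOuter set 0 0 false

-- ===== PORT B =====
-- B-side helper: the guarded probe `len(set) > 1 and len(set[1]) > 1 and set[1][1] != '-'`;
-- the length guards make both indexings in-range, so the chain is exactly this getElem? match
def pvCenter (s : List (List String)) : Bool :=
  match s[1]? with
  | none => false
  | some row =>
    match row[1]? with
    | none => false
    | some c => decide (c ≠ "-")

def is_center_hole_alt (set : List (List String)) : Option Bool :=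
  let total : Int := (set.map (fun row => (row.length : Int))).sum
  let dashes : Int := (set.map (fun row => (PySem.List.count row "-" : Int))).sum
  let filled : Int := total - dashes
  if filled = 0 then none
  else
    let center : Bool := pvCenter set
    some (decide (filled = 1) && center)

-- ===== PRECONDITION & SPEC =====
def Spec_is_center_hole (set : List (List String)) (out : Option Bool) : Prop := out = is_center_hole_alt set
instance (set : List (List String)) (out : Option Bool) : Decidable (Spec_is_center_hole set out) := by unfold Spec_is_center_hole; infer_instance

-- ===== CLAIM (what is proved, stated in full; the proofs are below) =====
def Claim_equal_is_center_hole : Prop := ∀ (set : List (List String)), Dom_is_center_hole set → Spec_is_center_hole set (is_center_hole set)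

-- ===== LEMMAS AND PROOFS =====

-- proof-side helper: the list of coordinates of filled cells, used to characterize BOTH ports
def pvBRow (row : List String) (y : Int) (x : Int) : List (Int × Int) :=
  match row with
  | [] => []
  | place :: rest => (if place ≠ "-" then [(y, x)] else []) ++ pvBRow rest y (x + 1)

def pvBFilled (rows : List (List String)) (y : Int) : List (Int × Int) :=
  match rows with
  | [] => []
  | row :: rest => pvBRow row y 0 ++ pvBFilled rest (y + 1)

theorem pvBRow_coord (row : List String) (y x : Int) :
    ∀ p ∈ pvBRow row y x, p.1 = y ∧ x ≤ p.2 := by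
  induction row generalizing x with
  | nil => simp [pvBRow]
  | cons place rest ih =>
    intro p hp
    simp only [pvBRow, List.mem_append] at hp
    rcases hp with hp | hp
    · split at hp <;> simp_all
    · have := ih (x + 1) p hp
      omega

theorem pvBFilled_coord (rows : List (List String)) (y : Int) :
    ∀ p ∈ pvBFilled rows y, y ≤ p.1 := by
  induction rows generalizing y with
  | nil => simp [pvBFilled]
  | cons row rest ih =>
    intro p hp
    simp only [pvBFilled, List.mem_append] at hp
    rcases hp with hp | hp
    · exact (pvBRow_coord row y 0 p hp).1.ge
    · have := ih (y + 1) p hp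
      omega

-- A's inner loop, characterized by the coordinate list of the row
theorem pvARow_char (row : List String) (y x i : Int) (ic : Bool) :
    pvARow row y x i ic =
      if pvBRow row y x = [] then some (i + row.length, x + row.length, ic)
      else if y = 1 ∧ pvBRow row y x = [(1, 1)] then
        some (i + row.length - 1, x + row.length, true)
      else none := by
  induction row generalizing x i ic with
  | nil => simp [pvARow, pvBRow]
  | cons place rest ih =>
    by_cases hpl : place ≠ "-"
    · by_cases hc : y = 1 ∧ x = 1
      · obtain ⟨hy, hx⟩ := hc
        subst hy hx
        have hco := pvBRow_coord rest 1 2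
        by_cases hr : pvBRow rest 1 2 = []
        · simp [pvARow, pvBRow, hpl, ih, hr]
          omega
        · have h11 : ¬ pvBRow rest 1 2 = [(1, 1)] := by
            intro he
            have := (hco (1, 1) (by rw [he]; simp)).2
            omega
          simp [pvARow, pvBRow, hpl, ih, hr, h11]
      · have hB : ¬ (y = 1 ∧ ((y, x) :: pvBRow rest y (x + 1) : List (Int × Int)) = [(1, 1)]) := by
          rintro ⟨hy, he⟩
          simp only [List.cons.injEq, Prod.mk.injEq] at he
          exact hc ⟨hy, he.1.2⟩
        simp [pvARow, pvBRow, hpl, hc]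
    · have hpe : place = "-" := not_not.mp hpl
      have hlhs : pvARow (place :: rest) y x i ic = pvARow rest y (x + 1) (i + 1) ic := by
        simp [pvARow, hpe]
      have hfr : pvBRow (place :: rest) y x = pvBRow rest y (x + 1) := by
        simp [pvBRow, hpe]
      rw [hlhs, hfr, ih]
      split_ifs <;> simp <;> omega

-- A's outer loop, characterized by the filled-cell list
theorem pvAOuter_char (rows : List (List String)) (y i : Int) (ic : Bool)
    (hy : ic = true → 2 ≤ y) :
    pvAOuter rows y i ic =
      if ic then (if pvBFilled rows y = [] then some true else some false)
      else if pvBFilled rows y = [] then none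
      else if pvBFilled rows y = [(1, 1)] then some true
      else some false := by
  induction rows generalizing y i ic with
  | nil => cases ic <;> simp [pvAOuter, pvBFilled]
  | cons row rest ih =>
    by_cases hr : pvBRow row y 0 = []
    · have hlhs : pvAOuter (row :: rest) y i ic = pvAOuter rest (y + 1) (i + row.length) ic := by
        simp [pvAOuter, pvARow_char, hr]
      rw [hlhs, ih (y + 1) _ ic (fun h => by have := hy h; omega)]
      simp [pvBFilled, hr]
    · by_cases hc : y = 1 ∧ pvBRow row y 0 = [(1, 1)]
      · obtain ⟨hy1, he⟩ := hc
        subst hy1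
        have hic : ic = false := by
          cases ic
          · rfl
          · exact absurd (hy rfl) (by omega)
        subst hic
        have hlhs : pvAOuter (row :: rest) 1 i false =
            pvAOuter rest 2 (i + row.length - 1) true := by
          simp [pvAOuter, pvARow_char, he]
        rw [hlhs, ih 2 _ true (fun _ => by omega)]
        by_cases h2 : pvBFilled rest 2 = []
        · simp [pvBFilled, he, h2]
        · have hne2 : ¬ (((1:Int), (1:Int)) :: pvBFilled rest 2 = [(1, 1)]) := by
            simp [h2]
          simp [pvBFilled, he, h2, hne2]
      · have hlhs : pvAOuter (row :: rest) y i ic = some false := by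
          simp only [pvAOuter, pvARow_char]
          rw [if_neg hr, if_neg hc]
        have hne : pvBRow row y 0 ++ pvBFilled rest (y + 1) ≠ [] := by simp [hr]
        have hne1 : pvBRow row y 0 ++ pvBFilled rest (y + 1) ≠ [(1, 1)] := by
          intro habs
          cases hl : pvBRow row y 0 with
          | nil => exact hr hl
          | cons a as =>
            rw [hl] at habs
            simp only [List.cons_append, List.cons.injEq] at habs
            obtain ⟨ha, htail⟩ := habs
            rcases List.append_eq_nil_iff.mp htail with ⟨has, -⟩
            by_cases hy1 : y = 1
            · exact hc ⟨hy1, by rw [hl, ha, has]⟩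
            · exact hy1 (pvBRow_coord row y 0 (1, 1) (by rw [hl, ha]; simp)).1.symm
        rw [hlhs]
        cases ic
        · simp [pvBFilled, hne, hne1]
        · simp [pvBFilled, hne]

-- B's count arithmetic equals the length of the coordinate list, per row …
theorem pvBRow_length (row : List String) (y x : Int) :
    ((pvBRow row y x).length : Int) = (row.length : Int) - (PySem.List.count row "-" : Int) := by
  induction row generalizing x with
  | nil => simp [pvBRow, PySem.List.count]
  | cons place rest ih =>
    by_cases hpl : place = "-"
    · simp [pvBRow, PySem.List.count, hpl, ih]
    · simp [pvBRow, PySem.List.count, hpl, ih]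
      omega

-- … and over the whole board
theorem pvBFilled_length (rows : List (List String)) (y : Int) :
    ((pvBFilled rows y).length : Int) =
      (rows.map (fun row => (row.length : Int))).sum
        - (rows.map (fun row => (PySem.List.count row "-" : Int))).sum := by
  induction rows generalizing y with
  | nil => simp [pvBFilled]
  | cons row rest ih =>
    simp [pvBFilled, pvBRow_length, ih]
    omega

-- membership at column j of a row
theorem mem_pvBRow_idx (row : List String) (y x : Int) (j : Nat) :
    (y, x + (j : Int)) ∈ pvBRow row y x ↔ ∃ c, row[j]? = some c ∧ c ≠ "-" := by
  induction row generalizing x j with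
  | nil => simp [pvBRow]
  | cons place rest ih =>
    cases j with
    | zero =>
      have hz : x + ((0 : Nat) : Int) = x := by simp
      rw [hz]
      have hnot : (y, x) ∉ pvBRow rest y (x + 1) := by
        intro h
        have := (pvBRow_coord rest y (x + 1) _ h).2
        omega
      by_cases hpl : place = "-"
      · simp [pvBRow, hpl, hnot]
      · simp [pvBRow, hpl, hnot]
    | succ k =>
      have hx : x + ((k + 1 : Nat) : Int) = (x + 1) + (k : Int) := by push_cast; ring
      by_cases hpl : place = "-"
      · rw [hx]
        simp [pvBRow, hpl, ih]
      · have hne : ¬ ((y, x + ((k + 1 : Nat) : Int)) = (y, x)) := by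
          intro h
          simp [Prod.ext_iff] at h
          omega
        rw [hx] at hne ⊢
        simp [pvBRow, hpl, ih, hne]

-- the port's center probe ↔ (1,1) is a filled coordinate
theorem center_mem (s : List (List String)) :
    pvCenter s = true ↔ ((1 : Int), (1 : Int)) ∈ pvBFilled s 0 := by
  unfold pvCenter
  match s with
  | [] => simp [pvBFilled]
  | [r0] =>
    have h0 : ((1 : Int), (1 : Int)) ∉ pvBRow r0 0 0 := by
      intro h
      have := (pvBRow_coord r0 0 0 _ h).1
      simp at this
    simp [pvBFilled, h0]
  | r0 :: r1 :: rest =>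
    have h0 : ((1 : Int), (1 : Int)) ∉ pvBRow r0 0 0 := by
      intro h
      have := (pvBRow_coord r0 0 0 _ h).1
      simp at this
    have h2 : ((1 : Int), (1 : Int)) ∉ pvBFilled rest 2 := by
      intro h
      have := pvBFilled_coord rest 2 _ h
      simp at this
    have hmid : ((1 : Int), (1 : Int)) ∈ pvBRow r1 1 0 ↔ ∃ c, r1[1]? = some c ∧ c ≠ "-" := by
      have := mem_pvBRow_idx r1 1 0 1
      simpa using this
    simp only [pvBFilled, List.mem_append]
    rw [show (r0 :: r1 :: rest)[1]? = some r1 from rfl]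
    cases hg : r1[1]? with
    | none => simp [h0, h2, hmid, hg]
    | some c => simp [h0, h2, hmid, hg]

-- ===== VERDICT (by name: the statement is the Claim_ definition above) =====
theorem is_center_hole_spec : Claim_equal_is_center_hole := by
  intro set _
  unfold Spec_is_center_hole is_center_hole is_center_hole_alt
  rw [pvAOuter_char set 0 0 false (by simp)]
  simp only [Bool.false_eq_true, if_false]
  have hcm := center_mem set
  have hlen := pvBFilled_length set 0
  rw [← hlen]
  generalize hL : pvBFilled set 0 = L at hcm ⊢
  by_cases hnil : L = []
  · simp [hnil]
  · have hlen0 : ¬ ((L.length : Int) = 0) := by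
      intro h
      exact hnil (List.length_eq_zero_iff.mp (by exact_mod_cast h))
    rw [if_neg hnil, if_neg hlen0]
    by_cases h11 : L = [(1, 1)]
    · subst h11
      have hc : pvCenter set = true := hcm.mpr (by simp)
      simp [hc]
    · rw [if_neg h11]
      by_cases hl1 : L.length = 1
      · obtain ⟨a, ha⟩ := List.length_eq_one_iff.mp hl1
        have hnm : ((1 : Int), (1 : Int)) ∉ L := by
          intro hm
          rw [ha] at hm
          simp at hm
          exact h11 (by rw [ha, hm])
        have hMf : pvCenter set = false := by
          rcases Bool.eq_false_or_eq_true (pvCenter set) with h | h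
          · exact absurd (hcm.mp h) hnm
          · exact h
        simp [hMf]
      · have h1' : ¬ ((L.length : Int) = 1) := by
          intro h
          exact hl1 (by exact_mod_cast h)
        simp [h1']
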